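-- pv_equiv track=rewrite | github.com/ulloacastillo/INFO081-Programacion-UACh | Listas-Strings/ejercicio4.py | k_equilibrada
-- ===== SOURCE A (Python) =====
-- def k_equilibrada(palabra, k):
--     equilibradas = 0;no_equilibradas = 0; semi_equilibradas = 0;
--     for i in range(0, len(palabra), k):
--         vocales = 0
--         consonantes = 0
--         for j in range(len(palabra[i:i+k])):
--             if palabra[i:i+k][j].lower() in "aeiou":
--                 vocales += 1
--             else:
--                 consonantes += 1
--         if abs(vocales - consonantes) == 0:
--             equilibradas += 1
--         elif abs(vocales - consonantes) == 1:
--             semi_equilibradas += 1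
--         else:
--             no_equilibradas += 1
--     if no_equilibradas == 0 and semi_equilibradas == 1 and equilibradas >= 1:
--         return "K-Equilibrada"
--     elif semi_equilibradas >= 1 and no_equilibradas == 0 and equilibradas >= 0:
--         return "semi-k-equilibrada"
--     else:
--         return "no-k-equilibrada"
-- ===== SOURCE B (Python) =====
-- def _agrega(cuentas, d):
--     eq, semi, bad = cuentas
--     if d == 0:
--         return (eq + 1, semi, bad)
--     elif d == 1:
--         return (eq, semi + 1, bad)
--     else:
--         return (eq, semi, bad + 1)
--
--
-- def k_equilibrada(palabra, k):
--     # single left-to-right pass over the characters, flushing at chunk boundaries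
--     cuentas = (0, 0, 0)  # (equilibradas, semi, no-equilibradas)
--     if k > 0:
--         pos = 0
--         voc = 0
--         for c in palabra:
--             pos += 1
--             if c.lower() in "aeiou":
--                 voc += 1
--             if pos == k:
--                 cuentas = _agrega(cuentas, abs(2 * voc - k))
--                 pos = 0
--                 voc = 0
--         if pos > 0:
--             cuentas = _agrega(cuentas, abs(2 * voc - pos))
--     eq, semi, bad = cuentas
--     if bad == 0 and semi == 1 and eq >= 1:
--         return "K-Equilibrada"
--     elif semi >= 1 and bad == 0:
--         return "semi-k-equilibrada"
--     else:
--         return "no-k-equilibrada"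
-- ===== Notes on version B (the rewrite author's own statement) =====
-- stated objective: faster
-- what changed: B replaces A's range-step loop with an inner index loop that re-slices palabra[i:i+k] at every character by a single left-to-right pass over the characters that keeps (position-in-chunk, vowel count) and flushes a counter triple at each chunk boundary and once at the end.
import Mathlib
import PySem

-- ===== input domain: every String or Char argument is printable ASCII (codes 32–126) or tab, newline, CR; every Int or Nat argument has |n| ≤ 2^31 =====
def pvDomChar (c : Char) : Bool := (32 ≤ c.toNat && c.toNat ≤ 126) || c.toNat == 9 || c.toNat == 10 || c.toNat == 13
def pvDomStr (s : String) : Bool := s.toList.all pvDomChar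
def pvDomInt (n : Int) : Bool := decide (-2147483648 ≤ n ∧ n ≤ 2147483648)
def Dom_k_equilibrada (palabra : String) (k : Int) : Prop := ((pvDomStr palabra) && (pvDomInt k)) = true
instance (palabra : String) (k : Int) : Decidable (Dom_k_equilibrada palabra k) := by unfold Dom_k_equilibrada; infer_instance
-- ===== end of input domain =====

-- B replaces A's index-range loop with inner re-slicing by ONE left-to-right character pass that
-- flushes a counter triple at each chunk boundary (objective: faster; measured faster in a timing run).

-- shared helper: c.lower() in "aeiou" (identical expression in both Pythons)
def pvEsVocal (c : Char) : Bool :=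
  PySem.Chars.isIn [PySem.Chars.lowerChar c] "aeiou".toList

-- ===== PORT A =====
def k_equilibrada (palabra : String) (k : Int) : String :=
  let cs := palabra.toList
  -- (equilibradas, no_equilibradas, semi_equilibradas)
  let res := (PySem.List.pyRange 0 (cs.length : Int) k).foldl
    (fun (acc : Int × Int × Int) i =>
      let chunk := PySem.List.slice cs (some i) (some (i + k))
      let vc := (PySem.List.pyRange 0 (chunk.length : Int) 1).foldl
        (fun (p : Int × Int) j =>
          if pvEsVocal (PySem.List.pyGetD chunk j ' ') then (p.1 + 1, p.2)
          else (p.1, p.2 + 1)) (0, 0)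
      if (vc.1 - vc.2).natAbs = 0 then (acc.1 + 1, acc.2.1, acc.2.2)
      else if (vc.1 - vc.2).natAbs = 1 then (acc.1, acc.2.1, acc.2.2 + 1)
      else (acc.1, acc.2.1 + 1, acc.2.2))
    ((0 : Int), (0 : Int), (0 : Int))
  if res.2.1 = 0 ∧ res.2.2 = 1 ∧ 1 ≤ res.1 then "K-Equilibrada"
  else if 1 ≤ res.2.2 ∧ res.2.1 = 0 ∧ 0 ≤ res.1 then "semi-k-equilibrada"
  else "no-k-equilibrada"

-- ===== PORT B =====
-- B's helper _agrega(cuentas, d): cuentas = (equilibradas, semi, no-equilibradas)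
def pvAgrega (c : Int × Int × Int) (d : Nat) : Int × Int × Int :=
  if d = 0 then (c.1 + 1, c.2.1, c.2.2)
  else if d = 1 then (c.1, c.2.1 + 1, c.2.2)
  else (c.1, c.2.1, c.2.2 + 1)

def k_equilibrada_alt (palabra : String) (k : Int) : String :=
  let cs := palabra.toList
  let cuentas : Int × Int × Int :=
    if 0 < k then
      -- state (pos, voc, cuentas), one pass over the characters
      let s := cs.foldl (fun (st : Int × Int × (Int × Int × Int)) c =>
        let pos := st.1 + 1
        let voc := if pvEsVocal c then st.2.1 + 1 else st.2.1
        if pos = k then ((0 : Int), (0 : Int), pvAgrega st.2.2 (2 * voc - k).natAbs)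
        else (pos, voc, st.2.2)) ((0 : Int), (0 : Int), ((0 : Int), (0 : Int), (0 : Int)))
      if 0 < s.1 then pvAgrega s.2.2 (2 * s.2.1 - s.1).natAbs else s.2.2
    else ((0 : Int), (0 : Int), (0 : Int))
  if cuentas.2.2 = 0 ∧ cuentas.2.1 = 1 ∧ 1 ≤ cuentas.1 then "K-Equilibrada"
  else if 1 ≤ cuentas.2.1 ∧ cuentas.2.2 = 0 then "semi-k-equilibrada"
  else "no-k-equilibrada"

-- ===== PRECONDITION & SPEC =====
-- Pre_ excludes only k = 0, on which Python's range(0, len, 0) raises ValueError in A.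
def Pre_k_equilibrada (palabra : String) (k : Int) : Prop := k ≠ 0
instance (palabra : String) (k : Int) : Decidable (Pre_k_equilibrada palabra k) := by
  unfold Pre_k_equilibrada; infer_instance

def pvWitness_k_equilibrada : String × Int := ("casa", 2)

def Spec_k_equilibrada (palabra : String) (k : Int) (out : String) : Prop := out = k_equilibrada_alt palabra k
instance (palabra : String) (k : Int) (out : String) : Decidable (Spec_k_equilibrada palabra k out) := by unfold Spec_k_equilibrada; infer_instance

-- ===== CLAIM (what is proved, stated in full; the proofs are below) =====
def Claim_equal_k_equilibrada : Prop := ∀ (palabra : String) (k : Int), Dom_k_equilibrada palabra k → Pre_k_equilibrada palabra k → Spec_k_equilibrada palabra k (k_equilibrada palabra k)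

-- ===== LEMMAS AND PROOFS =====

-- per-chunk diff |2*vowels - len(chunk)|
def pvd (l : List Char) : Nat :=
  (2 * ((l.countP pvEsVocal : Nat) : Int) - (l.length : Int)).natAbs

def pvDiff (cs : List Char) (k i : Int) : Nat :=
  pvd (PySem.List.slice cs (some i) (some (i + k)))

-- A's classification step on (equilibradas, no_equilibradas, semi_equilibradas)
def pvStep (t : Int × Int × Int) (x : Nat) : Int × Int × Int :=
  if x = 0 then (t.1 + 1, t.2.1, t.2.2)
  else if x = 1 then (t.1, t.2.1, t.2.2 + 1)
  else (t.1, t.2.1 + 1, t.2.2)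

-- A's final classification
def pvFinalA (t : Int × Int × Int) : String :=
  if t.2.1 = 0 ∧ t.2.2 = 1 ∧ 1 ≤ t.1 then "K-Equilibrada"
  else if 1 ≤ t.2.2 ∧ t.2.1 = 0 ∧ 0 ≤ t.1 then "semi-k-equilibrada"
  else "no-k-equilibrada"

-- B's final classification on (equilibradas, semi, no-equilibradas)
def pvFinalB (t : Int × Int × Int) : String :=
  if t.2.2 = 0 ∧ t.2.1 = 1 ∧ 1 ≤ t.1 then "K-Equilibrada"
  else if 1 ≤ t.2.1 ∧ t.2.2 = 0 then "semi-k-equilibrada"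
  else "no-k-equilibrada"

-- diffs of the k-chunks of cs, chunk size km+1
def pvChunkDiffs (km : Nat) : List Char → List Nat
  | [] => []
  | c :: rest => pvd ((c :: rest).take (km + 1)) :: pvChunkDiffs km ((c :: rest).drop (km + 1))
  termination_by cs => cs.length
  decreasing_by simp

lemma pvChunkDiffs_nil (km : Nat) : pvChunkDiffs km [] = [] := by
  rw [pvChunkDiffs.eq_def]

lemma pvChunkDiffs_cons (km : Nat) (c : Char) (rest : List Char) :
    pvChunkDiffs km (c :: rest)
    = pvd ((c :: rest).take (km + 1)) :: pvChunkDiffs km ((c :: rest).drop (km + 1)) := by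
  rw [pvChunkDiffs.eq_def]

lemma pvCountPConsInt (y : Char) (ys : List Char) :
    ((List.countP pvEsVocal (y :: ys) : Nat) : Int)
    = ((List.countP pvEsVocal ys : Nat) : Int) + (if pvEsVocal y then 1 else 0) := by
  by_cases hv : pvEsVocal y = true <;> simp [List.countP_cons, hv]

lemma pvIteAdd (b : Bool) (v : Int) :
    (if b = true then v + 1 else v) = v + (if b = true then 1 else 0) := by
  cases b <;> simp

lemma pvCountSplit (p : Char → Bool) (l : List Char) :
    l.countP p + l.countP (fun c => !p c) = l.length := by
  induction l with
  | nil => simp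
  | cons c l ih =>
    by_cases h : p c = true <;> simp [h] <;> omega

lemma pvInnerFold (chunk : List Char) : ∀ (a b : Int),
    chunk.foldl (fun (p : Int × Int) c =>
      if pvEsVocal c then (p.1 + 1, p.2) else (p.1, p.2 + 1)) (a, b)
    = (a + (chunk.countP pvEsVocal : Int), b + (chunk.countP (fun c => !pvEsVocal c) : Int)) := by
  induction chunk with
  | nil => intro a b; simp
  | cons c cs ih =>
    intro a b
    by_cases h : pvEsVocal c = true <;>
      simp [List.foldl_cons, h, ih] <;> ring

lemma pvBody (cs : List Char) (k i : Int) (acc : Int × Int × Int) :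
    (let chunk := PySem.List.slice cs (some i) (some (i + k))
     let vc := (PySem.List.pyRange 0 (chunk.length : Int) 1).foldl
       (fun (p : Int × Int) j =>
         if pvEsVocal (PySem.List.pyGetD chunk j ' ') then (p.1 + 1, p.2)
         else (p.1, p.2 + 1)) ((0 : Int), (0 : Int))
     if (vc.1 - vc.2).natAbs = 0 then (acc.1 + 1, acc.2.1, acc.2.2)
     else if (vc.1 - vc.2).natAbs = 1 then (acc.1, acc.2.1, acc.2.2 + 1)
     else (acc.1, acc.2.1 + 1, acc.2.2))
    = pvStep acc (pvDiff cs k i) := by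
  set chunk := PySem.List.slice cs (some i) (some (i + k)) with hchunk
  have hinner : (PySem.List.pyRange 0 (chunk.length : Int) 1).foldl
      (fun (p : Int × Int) j =>
        if pvEsVocal (PySem.List.pyGetD chunk j ' ') then (p.1 + 1, p.2)
        else (p.1, p.2 + 1)) ((0 : Int), (0 : Int))
      = ((chunk.countP pvEsVocal : Int), (chunk.countP (fun c => !pvEsVocal c) : Int)) := by
    rw [PySem.List.foldl_pyRange_zero_pyGetD' chunk ' '
      (fun (p : Int × Int) c => if pvEsVocal c then (p.1 + 1, p.2) else (p.1, p.2 + 1))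
      ((0 : Int), (0 : Int))]
    rw [pvInnerFold chunk 0 0]
    simp
  simp only [hinner]
  have hlen := pvCountSplit pvEsVocal chunk
  have hdiff : ((chunk.countP pvEsVocal : Int) - (chunk.countP (fun c => !pvEsVocal c) : Int)).natAbs
      = pvDiff cs k i := by
    unfold pvDiff pvd
    rw [← hchunk]
    omega
  rw [hdiff, pvStep]

lemma pvFoldA (cs : List Char) (k : Int) : ∀ (L : List Int) (init : Int × Int × Int),
    L.foldl (fun (acc : Int × Int × Int) i =>
      let chunk := PySem.List.slice cs (some i) (some (i + k))
      let vc := (PySem.List.pyRange 0 (chunk.length : Int) 1).foldl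
        (fun (p : Int × Int) j =>
          if pvEsVocal (PySem.List.pyGetD chunk j ' ') then (p.1 + 1, p.2)
          else (p.1, p.2 + 1)) ((0 : Int), (0 : Int))
      if (vc.1 - vc.2).natAbs = 0 then (acc.1 + 1, acc.2.1, acc.2.2)
      else if (vc.1 - vc.2).natAbs = 1 then (acc.1, acc.2.1, acc.2.2 + 1)
      else (acc.1, acc.2.1 + 1, acc.2.2)) init
    = (L.map (pvDiff cs k)).foldl pvStep init := by
  intro L
  induction L with
  | nil => intro init; rfl
  | cons i L ih =>
    intro init
    rw [List.map_cons, List.foldl_cons, List.foldl_cons, ← ih, pvBody cs k i init]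

lemma pvA_eq (palabra : String) (k : Int) :
    k_equilibrada palabra k
    = pvFinalA (((PySem.List.pyRange 0 (palabra.toList.length : Int) k).map
        (pvDiff palabra.toList k)).foldl pvStep ((0 : Int), (0 : Int), (0 : Int))) := by
  show pvFinalA ((PySem.List.pyRange 0 (palabra.toList.length : Int) k).foldl
    (fun (acc : Int × Int × Int) i =>
      let chunk := PySem.List.slice palabra.toList (some i) (some (i + k))
      let vc := (PySem.List.pyRange 0 (chunk.length : Int) 1).foldl
        (fun (p : Int × Int) j =>
          if pvEsVocal (PySem.List.pyGetD chunk j ' ') then (p.1 + 1, p.2)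
          else (p.1, p.2 + 1)) ((0 : Int), (0 : Int))
      if (vc.1 - vc.2).natAbs = 0 then (acc.1 + 1, acc.2.1, acc.2.2)
      else if (vc.1 - vc.2).natAbs = 1 then (acc.1, acc.2.1, acc.2.2 + 1)
      else (acc.1, acc.2.1 + 1, acc.2.2)) ((0 : Int), (0 : Int), (0 : Int))) = _
  rw [pvFoldA]

-- range(0, n, k) for 0 < k, 0 < n splits off its head
lemma pvRangeCons (n k : Int) (hk : 0 < k) (hn : 0 < n) :
    PySem.List.pyRange 0 n k = 0 :: (PySem.List.pyRange 0 (n - k) k).map (· + k) := by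
  rw [PySem.List.pyRange_of_pos _ _ hk, PySem.List.pyRange_of_pos _ _ hk]
  by_cases h : 0 < n - k
  · have hcnt : ((n - 0 + k - 1) / k) = ((n - k - 0 + k - 1) / k) + 1 := by
      have he : n - 0 + k - 1 = (n - k - 0 + k - 1) + 1 * k := by ring
      rw [he, Int.add_mul_ediv_right _ _ (by omega : k ≠ 0)]
    have hge : 0 ≤ (n - k - 0 + k - 1) / k := by
      apply Int.ediv_nonneg <;> omega
    simp only [hn, h, if_pos]
    rw [hcnt, Int.toNat_add hge (by norm_num), Int.toNat_one, List.range_succ_eq_map]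
    simp only [List.map_cons, List.map_map]
    congr 1
    · norm_num
    · apply List.map_congr_left
      intro a _
      simp [Nat.succ_eq_add_one, Function.comp]
      push_cast
      ring
  · -- n ≤ k : exactly one chunk
    have h2 : ((n - 0 + k - 1) / k) = 1 := by
      have he : n - 0 + k - 1 = (n - 1) + 1 * k := by ring
      rw [he, Int.add_mul_ediv_right _ _ (by omega : k ≠ 0),
        Int.ediv_eq_zero_of_lt (by omega) (by omega)]
      norm_num
    simp only [hn, h, if_pos]
    rw [h2]
    simp

lemma pvDiffShift (cs : List Char) (km : Nat) (i : Int) (hi : 0 ≤ i) :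
    pvDiff cs ((km : Int) + 1) (i + ((km : Int) + 1)) = pvDiff (cs.drop (km + 1)) ((km : Int) + 1) i := by
  obtain ⟨j, rfl⟩ := Int.eq_ofNat_of_zero_le hi
  unfold pvDiff
  congr 1
  rw [PySem.List.slice_toNat cs (by positivity) (by positivity),
    PySem.List.slice_toNat (cs.drop (km + 1)) (by positivity) (by positivity),
    List.drop_drop]
  have e1 : ((j : Int) + ((km : Int) + 1)).toNat = j + (km + 1) := by omega
  have e2 : ((j : Int) + ((km : Int) + 1) + ((km : Int) + 1)).toNat = (j + (km + 1)) + (km + 1) := by omega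
  have e3 : ((j : Int) + ((km : Int) + 1)).toNat = ((j : Int)).toNat + (km + 1) := by omega
  rw [e2, e1]
  congr 1
  · omega
  · congr 1
    omega

lemma pvDiffZero (cs : List Char) (km : Nat) :
    pvDiff cs ((km : Int) + 1) 0 = pvd (cs.take (km + 1)) := by
  unfold pvDiff
  congr 1
  have h := PySem.List.slice_natCast_add cs 0 (km + 1)
  push_cast at h
  simpa using h

lemma pvMapDiffs (km : Nat) : ∀ (cs : List Char),
    (PySem.List.pyRange 0 (cs.length : Int) ((km : Int) + 1)).map (pvDiff cs ((km : Int) + 1))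
    = pvChunkDiffs km cs := by
  intro cs
  induction hn : cs.length using Nat.strong_induction_on generalizing cs with
  | _ n ih =>
    subst hn
    match cs with
    | [] => simp [pvChunkDiffs_nil, PySem.List.pyRange]
    | c :: rest =>
      have hpos : (0 : Int) < (((c :: rest).length : Nat) : Int) := by
        simp
      rw [pvRangeCons _ _ (by positivity) hpos, List.map_cons, List.map_map]
      rw [pvChunkDiffs_cons]
      congr 1
      · exact pvDiffZero (c :: rest) km
      · have hmap : ∀ i ∈ PySem.List.pyRange 0 ((((c :: rest).length : Nat) : Int) - ((km : Int) + 1)) ((km : Int) + 1),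
            (pvDiff (c :: rest) ((km : Int) + 1) ∘ (· + ((km : Int) + 1))) i
            = pvDiff ((c :: rest).drop (km + 1)) ((km : Int) + 1) i := by
          intro i hi
          have := (PySem.List.mem_pyRange_iff_of_pos (by positivity) i).mp hi
          exact pvDiffShift (c :: rest) km i this.1
        rw [List.map_congr_left hmap]
        have hlen2 : ((((c :: rest).drop (km + 1)).length : Nat) : Int)
            = (((c :: rest).length : Nat) : Int) - ((km : Int) + 1) ∨
            (((c :: rest).length : Nat) : Int) - ((km : Int) + 1) ≤ 0 := by
          simp [List.length_drop]
          omega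
        have hsmall : ((c :: rest).drop (km + 1)).length < (c :: rest).length := by
          rw [List.length_drop]
          simp only [List.length_cons]
          omega
        rcases hlen2 with h | h
        · rw [← h]
          exact ih _ hsmall _ rfl
        · -- both ranges empty
          have e1 : PySem.List.pyRange 0 ((((c :: rest).length : Nat) : Int) - ((km : Int) + 1)) ((km : Int) + 1) = [] := by
            rw [PySem.List.pyRange_of_pos _ _ (by positivity)]
            simp only [if_neg (by omega : ¬ (0 : Int) < (((c :: rest).length : Nat) : Int) - ((km : Int) + 1))]
            simp
          have e2 : ((c :: rest).drop (km + 1)) = [] := by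
            apply List.drop_eq_nil_of_le
            simp at h ⊢; omega
          rw [e1, e2]
          simp [pvChunkDiffs_nil, PySem.List.pyRange]

-- ==== B side ====

-- the fold function of B's pass, chunk size k
def pvPaso (k : Int) (st : Int × Int × (Int × Int × Int)) (c : Char) : Int × Int × (Int × Int × Int) :=
  let pos := st.1 + 1
  let voc := if pvEsVocal c then st.2.1 + 1 else st.2.1
  if pos = k then ((0 : Int), (0 : Int), pvAgrega st.2.2 (2 * voc - k).natAbs)
  else (pos, voc, st.2.2)

-- one step of B's pass, with the Nat-level flush condition
lemma pvPaso_eq (km p : Nat) (v : Int) (t : Int × Int × Int) (c : Char) :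
    pvPaso ((km : Int) + 1) (((p : Nat) : Int), v, t) c
    = if p + 1 = km + 1
      then ((0 : Int), (0 : Int), pvAgrega t (2 * (if pvEsVocal c then v + 1 else v) - ((km : Int) + 1)).natAbs)
      else ((((p + 1 : Nat)) : Int), (if pvEsVocal c then v + 1 else v), t) := by
  unfold pvPaso
  have hiff : (((p : Nat) : Int) + 1 = (km : Int) + 1) ↔ (p + 1 = km + 1) := by omega
  simp only [hiff]
  by_cases h : p + 1 = km + 1
  · rw [if_pos h, if_pos h]
  · rw [if_neg h, if_neg h]
    simp only [Prod.mk.injEq]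
    push_cast
    simp

-- processing one (partial) chunk: flush exactly when pos reaches k
lemma pvChunkFold (km : Nat) : ∀ (ys : List Char) (p : Nat) (v : Int) (t : Int × Int × Int),
    p ≤ km → p + ys.length ≤ km + 1 →
    ys.foldl (pvPaso ((km : Int) + 1)) ((p : Int), v, t)
    = if p + ys.length = km + 1
      then ((0 : Int), (0 : Int), pvAgrega t (2 * (v + (ys.countP pvEsVocal : Int)) - ((km : Int) + 1)).natAbs)
      else (((p + ys.length : Nat) : Int), v + (ys.countP pvEsVocal : Int), t) := by
  intro ys
  induction ys with
  | nil =>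
    intro p v t hp _
    simp only [List.foldl_nil, List.length_nil, Nat.add_zero]
    rw [if_neg (by omega)]
    simp
  | cons y ys ih =>
    intro p v t hp hlen
    simp only [List.length_cons] at hlen
    rw [List.foldl_cons, pvPaso_eq]
    by_cases hflush : p + 1 = km + 1
    · -- flush now; then ys must be empty
      have hys : ys = [] := by
        have : ys.length = 0 := by omega
        exact List.eq_nil_of_length_eq_zero this
      subst hys
      rw [if_pos hflush]
      simp only [List.foldl_nil]
      have hc : p + [y].length = km + 1 := by
        simp only [List.length_cons, List.length_nil]; omega
      rw [if_pos hc]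
      simp only [Prod.mk.injEq]
      refine ⟨by trivial, by trivial, ?_⟩
      congr 2
      rw [pvIteAdd, pvCountPConsInt]
      simp only [List.countP_nil, Nat.cast_zero]
      ring
    · rw [if_neg hflush]
      rw [ih (p + 1) _ t (by omega) (by omega)]
      by_cases hend : (p + 1) + ys.length = km + 1
      · have hc : p + (y :: ys).length = km + 1 := by
          simp only [List.length_cons]; omega
        rw [if_pos hend, if_pos hc]
        simp only [Prod.mk.injEq]
        refine ⟨by trivial, by trivial, ?_⟩
        congr 2
        rw [pvIteAdd, pvCountPConsInt]
        ring
      · have hc : ¬ (p + (y :: ys).length = km + 1) := by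
          simp only [List.length_cons]; omega
        rw [if_neg hend, if_neg hc]
        simp only [Prod.mk.injEq]
        refine ⟨by simp only [List.length_cons]; push_cast; ring, ?_, by trivial⟩
        rw [pvIteAdd, pvCountPConsInt]
        ring

-- B's full pass+flush equals folding pvAgrega over the chunk diffs
lemma pvBmain (km : Nat) : ∀ (cs : List Char) (t : Int × Int × Int),
    (let s := cs.foldl (pvPaso ((km : Int) + 1)) ((0 : Int), (0 : Int), t)
     if 0 < s.1 then pvAgrega s.2.2 (2 * s.2.1 - s.1).natAbs else s.2.2)
    = (pvChunkDiffs km cs).foldl pvAgrega t := by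
  intro cs
  induction hn : cs.length using Nat.strong_induction_on generalizing cs with
  | _ n ih =>
    subst hn
    intro t
    match cs with
    | [] => simp [pvChunkDiffs_nil]
    | c :: rest =>
      rw [pvChunkDiffs_cons]
      conv_rhs => rw [List.foldl_cons]
      by_cases hbig : km + 1 ≤ (c :: rest).length
      · -- full first chunk, then recurse on the rest
        have htlen : ((c :: rest).take (km + 1)).length = km + 1 := by
          rw [List.length_take]; omega
        have hcf := pvChunkFold km ((c :: rest).take (km + 1)) 0 0 t (by omega)
          (by rw [htlen]; omega)
        rw [htlen] at hcf
        rw [if_pos (by omega : 0 + (km + 1) = km + 1)] at hcf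
        push_cast at hcf
        have hsplit : (c :: rest) = (c :: rest).take (km + 1) ++ (c :: rest).drop (km + 1) := by
          simp
        conv_lhs => rw [hsplit]
        rw [List.foldl_append, hcf]
        have hd : (2 * ((0 : Int) + ((((c :: rest).take (km + 1)).countP pvEsVocal : Nat) : Int)) - ((km : Int) + 1)).natAbs
            = pvd ((c :: rest).take (km + 1)) := by
          unfold pvd
          rw [htlen]
          congr 1
          push_cast
          ring
        rw [hd]
        have hsmall : ((c :: rest).drop (km + 1)).length < (c :: rest).length := by
          rw [List.length_drop]
          simp only [List.length_cons]
          omega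
        exact ih _ hsmall _ rfl _
      · -- the whole word is one short chunk
        have hlen : (c :: rest).length ≤ km := by omega
        have htake : (c :: rest).take (km + 1) = c :: rest := List.take_of_length_le (by omega)
        have hdrop : (c :: rest).drop (km + 1) = [] := List.drop_eq_nil_of_le (by omega)
        rw [htake, hdrop, pvChunkDiffs_nil]
        simp only [List.foldl_nil]
        have hcf := pvChunkFold km (c :: rest) 0 0 t (by omega)
          (by simp only [List.length_cons] at hbig ⊢; omega)
        rw [if_neg (by simp only [List.length_cons] at hbig ⊢; omega)] at hcf
        push_cast at hcf
        rw [hcf]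
        simp only
        rw [if_pos (by simp only [List.length_cons]; push_cast; omega)]
        unfold pvd
        congr 2
        push_cast
        ring

lemma pvB_eq (palabra : String) (k : Int) (hk : 0 < k) :
    k_equilibrada_alt palabra k
    = pvFinalB ((pvChunkDiffs (k.toNat - 1) palabra.toList).foldl pvAgrega ((0 : Int), (0 : Int), (0 : Int))) := by
  have hkm : ((k.toNat - 1 : Nat) : Int) + 1 = k := by omega
  unfold k_equilibrada_alt pvFinalB
  simp only [if_pos hk]
  have h := pvBmain (k.toNat - 1) palabra.toList ((0 : Int), (0 : Int), (0 : Int))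
  rw [hkm] at h
  simp only at h
  rw [show (palabra.toList.foldl (fun (st : Int × Int × (Int × Int × Int)) c =>
        let pos := st.1 + 1
        let voc := if pvEsVocal c then st.2.1 + 1 else st.2.1
        if pos = k then ((0 : Int), (0 : Int), pvAgrega st.2.2 (2 * voc - k).natAbs)
        else (pos, voc, st.2.2)) ((0 : Int), (0 : Int), ((0 : Int), (0 : Int), (0 : Int))))
      = palabra.toList.foldl (pvPaso k) ((0 : Int), (0 : Int), ((0 : Int), (0 : Int), (0 : Int))) from rfl]
  rw [h]

-- counting what the two step functions accumulate
lemma pvFoldStep (L : List Nat) : ∀ (e n s : Int),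
    L.foldl pvStep (e, n, s)
    = (e + (L.count 0 : Int),
       n + ((L.filter (fun x => !(x == 0) && !(x == 1))).length : Int),
       s + (L.count 1 : Int)) := by
  induction L with
  | nil => intro e n s; simp
  | cons x xs ih =>
    intro e n s
    rcases Nat.eq_zero_or_pos x with h0 | hpos
    · subst h0
      simp [pvStep, ih]
      ring
    · rcases eq_or_ne x 1 with h1 | h1
      · subst h1
        simp [pvStep, ih]
        ring
      · have hx0 : x ≠ 0 := by omega
        simp [pvStep, hx0, h1, ih]
        ring

lemma pvFoldAgrega (L : List Nat) : ∀ (e s b : Int),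
    L.foldl pvAgrega (e, s, b)
    = (e + (L.count 0 : Int),
       s + (L.count 1 : Int),
       b + ((L.filter (fun x => !(x == 0) && !(x == 1))).length : Int)) := by
  induction L with
  | nil => intro e s b; simp
  | cons x xs ih =>
    intro e s b
    rcases Nat.eq_zero_or_pos x with h0 | hpos
    · subst h0
      simp [pvAgrega, ih]
      ring
    · rcases eq_or_ne x 1 with h1 | h1
      · subst h1
        simp [pvAgrega, ih]
        ring
      · have hx0 : x ≠ 0 := by omega
        simp [pvAgrega, hx0, h1, ih]
        ring

lemma pvFinal_eq (D : List Nat) :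
    pvFinalA (D.foldl pvStep ((0 : Int), (0 : Int), (0 : Int)))
    = pvFinalB (D.foldl pvAgrega ((0 : Int), (0 : Int), (0 : Int))) := by
  rw [pvFoldStep, pvFoldAgrega]
  unfold pvFinalA pvFinalB
  dsimp only
  split_ifs <;> first | rfl | (exfalso; omega)

-- range(0, n, k) is empty for a negative step and 0 ≤ n
lemma pvRangeNeg (n k : Int) (hk : k < 0) (hn : 0 ≤ n) :
    PySem.List.pyRange 0 n k = [] := by
  unfold PySem.List.pyRange
  rw [if_neg (by omega)]
  simp only [if_neg (by omega : ¬ (0 : Int) < k), if_neg (by omega : ¬ n < 0)]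
  simp

-- ===== VERDICT (by name: the statement is the Claim_ definition above) =====
theorem k_equilibrada_spec : Claim_equal_k_equilibrada := by
  intro palabra k _ hk
  unfold Spec_k_equilibrada
  rcases lt_or_gt_of_ne hk with hneg | hpos
  · -- negative step: no chunks on either side
    rw [pvA_eq, pvRangeNeg _ _ hneg (by positivity)]
    have h : ¬ (0 : Int) < k := by omega
    simp [k_equilibrada_alt, h, pvFinalA, pvStep]
  · have hkm : ((k.toNat - 1 : Nat) : Int) + 1 = k := by omega
    rw [pvA_eq, pvB_eq palabra k hpos]
    rw [← hkm, pvMapDiffs (k.toNat - 1) palabra.toList]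
    exact pvFinal_eq _
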